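-- pv_equiv track=rewrite | github.com/EmbeddedRPC/erpc | erpcgen/test/conftest.py | filter_braces
-- ===== SOURCE A (Python) =====
-- import string
--
-- def filter_braces(text: str):
--     # @brief Double standalone single open or close braces.
--
--     result = ''
--     state = 0
--     for c in text:
--         if state == 0:
--             if c == '{':
--                 state = 1
--             elif c == '}':
--                 result += '}}'
--             else:
--                 result += c
--         elif state == 1:
--             if c not in string.whitespace:
--                 result += '{' + c
--                 state = 2
--             else:
--                 result += '{{' + c
--                 state = 0
--         elif state == 2:
--             if c == '}':
--                 result += '}'
--                 state = 0
--             else: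
--                 result += c
--         else:
--             raise Exception("unexpected state")
--     if state == 1:
--         result += '{{'
--     return result
-- ===== SOURCE B (Python) =====
-- import string
--
-- def filter_braces(text: str):
--     # Index-based lookahead parser: peek after '{' instead of carrying a state variable.
--     out = []
--     i, n = 0, len(text)
--     while i < n:
--         c = text[i]
--         if c == '}':
--             out.append('}}')
--             i += 1
--         elif c == '{':
--             if i + 1 >= n or text[i + 1] in string.whitespace:
--                 out.append('{{')
--                 i += 1
--             else:
--                 out.append('{' + text[i + 1])
--                 i += 2
--                 while i < n:
--                     ch = text[i]
--                     i += 1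
--                     out.append(ch)
--                     if ch == '}':
--                         break
--         else:
--             out.append(c)
--             i += 1
--     return ''.join(out)
-- ===== Notes on version B (the rewrite author's own statement) =====
-- stated objective: alternative
-- what changed: Replaced the carried state-variable automaton by an index-based lookahead parser: after an opening brace it peeks the next character to decide doubling, and an inner nested loop consumes the field body up to its closing brace.
import Mathlib
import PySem

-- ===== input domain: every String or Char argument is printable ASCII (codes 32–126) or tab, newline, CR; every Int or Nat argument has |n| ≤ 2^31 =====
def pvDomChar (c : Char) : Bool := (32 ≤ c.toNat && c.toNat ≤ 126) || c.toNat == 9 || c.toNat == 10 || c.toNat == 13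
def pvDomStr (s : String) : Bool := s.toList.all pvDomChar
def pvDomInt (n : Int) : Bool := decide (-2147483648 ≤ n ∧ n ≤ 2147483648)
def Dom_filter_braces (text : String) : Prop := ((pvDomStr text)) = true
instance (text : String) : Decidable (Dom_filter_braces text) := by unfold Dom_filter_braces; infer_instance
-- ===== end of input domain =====

-- B replaces A's carried state variable by an index-free lookahead parser with a nested
-- field-consuming loop (same cost; objective: alternative decomposition).

-- ===== PORT A =====
-- c in string.whitespace  (string.whitespace = ' \t\n\r\x0b\x0c'); shared by both ports
def pvWs (c : Char) : Bool :=
  c == ' ' || c == '\t' || c == '\n' || c == '\r' || c == '\x0b' || c == '\x0c'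

-- A's for-loop over the characters, carrying (state, result); Python's unreachable
-- 'raise' branch (state ∉ {0,1,2}) is the last match arm.
def aGo : List Char → Nat → List Char → List Char
  | [], state, res => if state = 1 then res ++ ['{', '{'] else res
  | c :: rest, state, res =>
    match state with
    | 0 =>
      if c = '{' then aGo rest 1 res
      else if c = '}' then aGo rest 0 (res ++ ['}', '}'])
      else aGo rest 0 (res ++ [c])
    | 1 =>
      if ¬ (pvWs c = true) then aGo rest 2 (res ++ ['{', c])
      else aGo rest 0 (res ++ ['{', '{', c])
    | 2 =>
      if c = '}' then aGo rest 0 (res ++ ['}'])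
      else aGo rest 2 (res ++ [c])
    | _ => res

def filter_braces (text : String) : String := String.ofList (aGo text.toList 0 [])

-- ===== PORT B =====
-- B's outer while-loop (altGo) with lookahead after '{', and its inner field-copying
-- while-loop (altField); advancing the index i = consuming the list head.
mutual
  def altGo : List Char → List Char
    | [] => []
    | c :: rest =>
      if c = '}' then '}' :: '}' :: altGo rest
      else if c = '{' then
        match rest with
        | [] => ['{', '{']
        | d :: rest2 =>
          if pvWs d then '{' :: '{' :: altGo (d :: rest2)
          else '{' :: d :: altField rest2
      else c :: altGo rest

  def altField : List Char → List Char
    | [] => []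
    | c :: rest => if c = '}' then '}' :: altGo rest else c :: altField rest
end

def filter_braces_alt (text : String) : String := String.ofList (altGo text.toList)

-- ===== PRECONDITION & SPEC =====
def Spec_filter_braces (text : String) (out : String) : Prop := out = filter_braces_alt text
instance (text : String) (out : String) : Decidable (Spec_filter_braces text out) := by unfold Spec_filter_braces; infer_instance

-- ===== CLAIM (what is proved, stated in full; the proofs are below) =====
def Claim_equal_filter_braces : Prop := ∀ (text : String), Dom_filter_braces text → Spec_filter_braces text (filter_braces text)

-- ===== LEMMAS AND PROOFS =====

-- what B emits after having read a lone '{' (= A's state 1), as a function of the rest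
def braceCase : List Char → List Char
  | [] => ['{', '{']
  | d :: rest2 => if pvWs d then '{' :: '{' :: altGo (d :: rest2) else '{' :: d :: altField rest2

theorem pvWs_ne_brace {c : Char} (h : pvWs c = true) : c ≠ '{' ∧ c ≠ '}' := by
  simp [pvWs] at h
  rcases h with ((((h | h) | h) | h) | h) | h <;> subst h <;> decide

theorem altGo_cons (c : Char) (rest : List Char) :
    altGo (c :: rest) =
      if c = '}' then '}' :: '}' :: altGo rest
      else if c = '{' then braceCase rest
      else c :: altGo rest := by
  rw [altGo.eq_def]
  cases rest <;> simp [braceCase]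

theorem altField_cons (c : Char) (rest : List Char) :
    altField (c :: rest) = if c = '}' then '}' :: altGo rest else c :: altField rest := by
  rw [altField.eq_def]

-- invariant linking A's three states to B's three parsing modes
theorem aGo_eq : ∀ (cs : List Char),
    (∀ res, aGo cs 0 res = res ++ altGo cs) ∧
    (∀ res, aGo cs 1 res = res ++ braceCase cs) ∧
    (∀ res, aGo cs 2 res = res ++ altField cs) := by
  intro cs
  induction cs with
  | nil => refine ⟨?_, ?_, ?_⟩ <;> intro res <;> simp [aGo, altGo, braceCase, altField]
  | cons c rest ih =>
    obtain ⟨ih0, ih1, ih2⟩ := ih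
    refine ⟨?_, ?_, ?_⟩ <;> intro res
    · by_cases h1 : c = '{'
      · subst h1; simp [aGo, ih1, altGo_cons]
      · by_cases h2 : c = '}'
        · subst h2; simp [aGo, ih0, altGo_cons]
        · simp [aGo, h1, h2, ih0, altGo_cons]
    · by_cases hw : pvWs c = true
      · obtain ⟨hb1, hb2⟩ := pvWs_ne_brace hw
        simp [aGo, hw, ih0, braceCase, altGo_cons, hb1, hb2]
      · simp [aGo, hw, ih2, braceCase]
    · by_cases h2 : c = '}'
      · subst h2; simp [aGo, ih0, altField_cons]
      · simp [aGo, h2, ih2, altField_cons]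

-- ===== VERDICT (by name: the statement is the Claim_ definition above) =====
theorem filter_braces_spec : Claim_equal_filter_braces := by
  intro text _
  unfold Spec_filter_braces filter_braces filter_braces_alt
  rw [(aGo_eq text.toList).1 []]
  rfl
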